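-- pv_equiv track=rewrite | github.com/meibohuhu/python_projects | basicPythonProject/junior/Iterator&generator/generator.py | current_beat1
-- ===== SOURCE A (Python) =====
-- def current_beat1(max):
--     nums = (1, 2, 3, 4)
--     i = 0
--     result = []
--     while len(result) < max:
--         if i >= len(nums): i = 0
--         result.append(nums[i])
--         i += 1
--     return result
-- ===== SOURCE B (Python) =====
-- def current_beat1(max):
--     if max <= 0:
--         return []
--     reps = (max + 3) // 4
--     return ([1, 2, 3, 4] * reps)[:max]
-- ===== Notes on version B (the rewrite author's own statement) =====
-- stated objective: idiomatic
-- what changed: B builds the whole list at once (replicate [1,2,3,4] ceil(max/4) times, then slice to max) instead of A's per-element append loop with a running wrap-around index.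
import Mathlib
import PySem

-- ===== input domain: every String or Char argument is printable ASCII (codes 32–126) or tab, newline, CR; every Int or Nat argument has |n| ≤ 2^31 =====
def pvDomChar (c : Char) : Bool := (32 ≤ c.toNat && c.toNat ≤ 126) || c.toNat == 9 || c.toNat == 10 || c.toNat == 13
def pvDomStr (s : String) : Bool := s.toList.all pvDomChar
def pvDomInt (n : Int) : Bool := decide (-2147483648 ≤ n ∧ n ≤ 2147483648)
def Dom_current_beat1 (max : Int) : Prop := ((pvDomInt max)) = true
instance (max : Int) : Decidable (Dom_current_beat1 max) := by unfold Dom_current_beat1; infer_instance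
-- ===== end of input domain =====

-- B builds the whole list at once (replicate [1,2,3,4] ⌈max/4⌉ times, then truncate to max)
-- instead of A's per-element append loop with a running wrap-around index (idiomatic; not claimed faster).

-- ===== PORT A =====
-- while len(result) < max: result grows by exactly one element each iteration,
-- so the loop runs exactly max.toNat times; that count is the structural fuel.
def current_beat1_loop : Nat → Int → List Int → List Int
  | 0, _, result => result
  | Nat.succ fuel, i, result =>
    let nums : List Int := [1, 2, 3, 4]
    let i' : Int := if i ≥ (nums.length : Int) then 0 else i
    -- nums[i'] : i' is always in range here, so pyGetD is exact (Python never raises)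
    current_beat1_loop fuel (i' + 1) (result ++ [PySem.List.pyGetD nums i' 0])

def current_beat1 (max : Int) : List Int :=
  current_beat1_loop max.toNat 0 []

-- ===== PORT B =====
def current_beat1_alt (max : Int) : List Int :=
  if max ≤ 0 then []
  else
    let reps := PySem.Int.floordiv (max + 3) 4
    PySem.List.slice (List.flatten (List.replicate reps.toNat [1, 2, 3, 4])) none (some max)

-- ===== PRECONDITION & SPEC =====
def Spec_current_beat1 (max : Int) (out : List Int) : Prop := out = current_beat1_alt max
instance (max : Int) (out : List Int) : Decidable (Spec_current_beat1 max out) := by unfold Spec_current_beat1; infer_instance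

-- ===== CLAIM (what is proved, stated in full; the proofs are below) =====
def Claim_equal_current_beat1 : Prop := ∀ (max : Int), Dom_current_beat1 max → Spec_current_beat1 max (current_beat1 max)

-- ===== LEMMAS AND PROOFS =====

-- canonical value: n elements of the 1,2,3,4 cycle starting at offset s
def pvPat (n s : Nat) : List Int := (List.range n).map (fun j => (((s + j) % 4 : Nat) : Int) + 1)

theorem pvPat_zero (s : Nat) : pvPat 0 s = [] := rfl

theorem pvPat_succ (n s : Nat) :
    pvPat (n + 1) s = (((s % 4 : Nat) : Int) + 1) :: pvPat n ((s + 1) % 4) := by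
  simp only [pvPat, List.range_succ_eq_map, List.map_cons, List.map_map]
  congr 1
  norm_num
  intro a ha
  omega

theorem pvPat_add_four (n : Nat) : pvPat (n + 4) 0 = [1, 2, 3, 4] ++ pvPat n 0 := by
  have h4 : n + 4 = 4 + n := by omega
  rw [h4]
  simp only [pvPat, List.range_add, List.map_append]
  have h1 : List.map (fun j => (((0 + j) % 4 : Nat) : Int) + 1) (List.range 4) = [1, 2, 3, 4] := by
    decide
  rw [h1]
  congr 1
  rw [List.map_map]
  apply List.map_congr_left
  intro j _
  simp only [Function.comp_apply]
  have hj : (0 + (4 + j)) % 4 = (0 + j) % 4 := by omega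
  rw [hj]

theorem loop_eq_pat : ∀ (n : Nat) (i : Nat) (res : List Int), i ≤ 4 →
    current_beat1_loop n (i : Int) res = res ++ pvPat n (i % 4)
  | 0, i, res, _ => by simp [current_beat1_loop, pvPat_zero]
  | Nat.succ n, i, res, hi => by
    interval_cases i
    · rw [show ((0 : Nat) : Int) = ((0 : Nat) : Int) from rfl]
      show current_beat1_loop (n + 1) 0 res = _
      rw [current_beat1_loop]
      simp only [List.length_cons, List.length_nil]
      norm_num
      rw [show (1 : Int) = ((1 : Nat) : Int) from rfl, loop_eq_pat n 1 _ (by omega)]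
      rw [pvPat_succ]
      simp [List.append_assoc]
    · show current_beat1_loop (n + 1) 1 res = _
      rw [current_beat1_loop]
      norm_num
      rw [show (2 : Int) = ((2 : Nat) : Int) from rfl, loop_eq_pat n 2 _ (by omega)]
      rw [pvPat_succ]
      simp [List.append_assoc, PySem.List.pyGetD, PySem.List.pyGet?, PySem.List.pyIdx?]
    · show current_beat1_loop (n + 1) 2 res = _
      rw [current_beat1_loop]
      norm_num
      rw [show (3 : Int) = ((3 : Nat) : Int) from rfl, loop_eq_pat n 3 _ (by omega)]
      rw [pvPat_succ]
      simp [List.append_assoc, PySem.List.pyGetD, PySem.List.pyGet?, PySem.List.pyIdx?]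
    · show current_beat1_loop (n + 1) 3 res = _
      rw [current_beat1_loop]
      norm_num
      rw [show (4 : Int) = ((4 : Nat) : Int) from rfl, loop_eq_pat n 4 _ (by omega)]
      rw [pvPat_succ]
      simp [List.append_assoc, PySem.List.pyGetD, PySem.List.pyGet?, PySem.List.pyIdx?]
    · show current_beat1_loop (n + 1) 4 res = _
      rw [current_beat1_loop]
      norm_num
      rw [show (1 : Int) = ((1 : Nat) : Int) from rfl, loop_eq_pat n 1 _ (by omega)]
      rw [pvPat_succ]
      simp [List.append_assoc]

theorem take_flatten_replicate : ∀ (k n : Nat), n ≤ 4 * k →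
    (List.flatten (List.replicate k ([1, 2, 3, 4] : List Int))).take n = pvPat n 0
  | 0, n, h => by
    have : n = 0 := by omega
    subst this; rfl
  | Nat.succ k, n, h => by
    rw [List.replicate_succ, List.flatten_cons]
    by_cases h4 : 4 ≤ n
    · obtain ⟨m, rfl⟩ : ∃ m, n = m + 4 := ⟨n - 4, by omega⟩
      rw [List.take_append]
      rw [List.take_of_length_le (by simp)]
      have hm4 : m + 4 - ([1, 2, 3, 4] : List Int).length = m := by simp
      rw [hm4, take_flatten_replicate k m (by omega), pvPat_add_four]
    · interval_cases n
      · rfl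
      · rw [List.take_append_of_le_length (by simp)]; decide
      · rw [List.take_append_of_le_length (by simp)]; decide
      · rw [List.take_append_of_le_length (by simp)]; decide

-- ===== VERDICT (by name: the statement is the Claim_ definition above) =====
theorem current_beat1_spec : Claim_equal_current_beat1 := by
  intro max _
  unfold Spec_current_beat1 current_beat1 current_beat1_alt
  by_cases hm : max ≤ 0
  · have : max.toNat = 0 := by omega
    simp [this, hm, current_beat1_loop]
  · simp only [hm, if_false]
    push Not at hm
    have h0 : (0 : Int) = ((0 : Nat) : Int) := rfl
    rw [h0, loop_eq_pat max.toNat 0 [] (by omega)]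
    have hfd : PySem.Int.floordiv (max + 3) 4 = (max + 3) / 4 :=
      PySem.Int.floordiv_eq_ediv_of_pos (by omega)
    have hmx : max = ((max.toNat : Nat) : Int) := by omega
    rw [hfd, hmx, PySem.List.slice_to_natCast]
    rw [take_flatten_replicate _ _ (by omega), Int.toNat_natCast]
    simp
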